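-- pv_equiv track=rewrite | github.com/songye38/2023_algorithm_study | 프로그래머스/2/12973. 짝지어 제거하기/짝지어 제거하기.py | solution
-- ===== SOURCE A (Python) =====
-- def solution(s):
--     stack = []
--     for i in s:
--         if i not in stack:
--             stack.append(i)
--         else:
--             if i  == stack[-1]:
--                 stack.pop()
--             else:
--                 stack.append(i)
--     if stack:
--         return 0
--     else:
--         return 1
-- ===== SOURCE B (Python) =====
-- def solution(s):
--     # Repeatedly run a left-to-right pass that deletes disjoint adjacent
--     # equal pairs, until a pass removes nothing; the string is fully
--     # reducible iff nothing is left.  (No stack is maintained.)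
--     cur = list(s)
--     while True:
--         nxt = []
--         i = 0
--         n = len(cur)
--         while i < n:
--             if i + 1 < n and cur[i] == cur[i + 1]:
--                 i += 2
--             else:
--                 nxt.append(cur[i])
--                 i += 1
--         if len(nxt) == n:
--             break
--         cur = nxt
--     return 1 if not cur else 0
-- ===== Notes on version B (the rewrite author's own statement) =====
-- stated objective: alternative
-- what changed: Replaces A's stack (with its per-character membership scan) by a stackless staged-pass rewriting: each pass deletes all disjoint adjacent equal pairs, repeated to a fixpoint; the answer is 1 iff nothing remains.
import Mathlib
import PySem

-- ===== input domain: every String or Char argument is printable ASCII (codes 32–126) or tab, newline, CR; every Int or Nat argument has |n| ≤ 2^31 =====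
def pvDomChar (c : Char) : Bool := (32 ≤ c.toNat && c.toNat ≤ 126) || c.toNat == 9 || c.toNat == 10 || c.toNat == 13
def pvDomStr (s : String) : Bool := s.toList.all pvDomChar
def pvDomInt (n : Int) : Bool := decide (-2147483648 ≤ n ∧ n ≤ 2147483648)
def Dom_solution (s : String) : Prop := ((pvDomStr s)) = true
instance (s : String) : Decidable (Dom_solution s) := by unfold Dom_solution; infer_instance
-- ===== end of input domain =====

-- B replaces A's stack loop by a stackless staged-pass rewriting (delete disjoint
-- adjacent equal pairs per pass, to a fixpoint); same return value, no speed claim.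

-- ===== PORT A =====
-- one loop step of A: membership scan, then compare with stack[-1]
def solA_step (st : List Char) (c : Char) : List Char :=
  if ¬ st.contains c then st ++ [c]
  else if st.getLast? = some c then st.dropLast
  else st ++ [c]

def solution (s : String) : Int :=
  let stack := s.toList.foldl solA_step []
  if stack.isEmpty then 1 else 0

-- ===== PORT B =====
-- one left-to-right pass: delete disjoint adjacent equal pairs (Python's inner while)
def passOnce : List Char → List Char
  | a :: b :: rest => if a = b then passOnce rest else a :: passOnce (b :: rest)
  | xs => xs

theorem passOnce_length_le (xs : List Char) : (passOnce xs).length ≤ xs.length := by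
  fun_induction passOnce xs with
  | case1 b rest ih => simp only [List.length_cons]; omega
  | case2 a b rest h ih => simp only [List.length_cons] at *; omega
  | case3 xs h => exact le_refl _

-- Python's outer while: repeat the pass until it removes nothing
def reduceLoop (cur : List Char) : List Char :=
  let nxt := passOnce cur
  if nxt.length = cur.length then cur else reduceLoop nxt
termination_by cur.length
decreasing_by
  exact lt_of_le_of_ne (passOnce_length_le cur) (by assumption)

def solution_alt (s : String) : Int :=
  if (reduceLoop s.toList).isEmpty then 1 else 0

-- ===== PRECONDITION & SPEC =====
def Spec_solution (s : String) (out : Int) : Prop := out = solution_alt s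
instance (s : String) (out : Int) : Decidable (Spec_solution s out) := by unfold Spec_solution; infer_instance

-- ===== CLAIM (what is proved, stated in full; the proofs are below) =====
def Claim_equal_solution : Prop := ∀ (s : String), Dom_solution s → Spec_solution s (solution s)

-- ===== LEMMAS AND PROOFS =====

-- proof-side model of the cancellation: a top-first stack step
def pstep (st : List Char) (c : Char) : List Char :=
  match st with
  | t :: rest => if t = c then rest else c :: t :: rest
  | [] => [c]

-- A's step is pstep on the reversed stack (A keeps the top last)
theorem solA_step_eq (st : List Char) (c : Char) :
    solA_step st c = (pstep st.reverse c).reverse := by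
  cases h : st.reverse with
  | nil =>
    have hst : st = [] := by simpa using congrArg List.reverse h
    subst hst
    simp [solA_step, pstep]
  | cons t rest =>
    have hst : st = rest.reverse ++ [t] := by
      have := congrArg List.reverse h
      simpa using this
    subst hst
    by_cases htc : t = c
    · subst htc
      simp [solA_step, pstep]
    · have hlast : (rest.reverse ++ [t]).getLast? = some t := by simp
      by_cases hmem : (rest.reverse ++ [t]).contains c
      · simp [solA_step, pstep, hlast, htc, Ne.symm htc]
      · simp [solA_step, pstep, htc, Ne.symm htc]

theorem foldA_eq (l : List Char) (st : List Char) :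
    l.foldl solA_step st = (l.foldl pstep st.reverse).reverse := by
  induction l generalizing st with
  | nil => simp
  | cons c l ih =>
    simp only [List.foldl_cons]
    rw [solA_step_eq st c, ih]
    simp

-- invariant: the stack never holds two equal adjacent elements
def StkInv (st : List Char) : Prop := List.IsChain (· ≠ ·) st

theorem pstep_inv {st : List Char} (h : StkInv st) (c : Char) : StkInv (pstep st c) := by
  cases st with
  | nil => simp [pstep, StkInv]
  | cons t rest =>
    by_cases htc : t = c
    · simpa [pstep, htc, StkInv] using (List.isChain_cons.mp h).2
    · show StkInv (if t = c then rest else c :: t :: rest)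
      rw [if_neg htc]
      exact List.isChain_cons_cons.mpr ⟨Ne.symm htc, h⟩

theorem pstep_pstep {st : List Char} (h : StkInv st) (a : Char) :
    pstep (pstep st a) a = st := by
  cases st with
  | nil => simp [pstep]
  | cons t rest =>
    by_cases hta : t = a
    · subst hta
      cases rest with
      | nil => simp [pstep]
      | cons u rest' =>
        have hut : u ≠ t := Ne.symm (List.isChain_cons_cons.mp h).1
        simp [pstep, hut]
    · simp [pstep, hta]

theorem foldl_passOnce (xs : List Char) :
    ∀ st : List Char, StkInv st → xs.foldl pstep st = (passOnce xs).foldl pstep st := by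
  fun_induction passOnce xs with
  | case1 b rest ih =>
    intro st hst
    have hpp : pstep (pstep st b) b = st := pstep_pstep hst b
    calc (b :: b :: rest).foldl pstep st
        = rest.foldl pstep st := by simp only [List.foldl_cons, hpp]
      _ = (passOnce rest).foldl pstep st := ih st hst
  | case2 a b rest h ih =>
    intro st hst
    simp only [List.foldl_cons]
    exact ih (pstep st a) (pstep_inv hst a)
  | case3 xs h =>
    intro st hst
    rfl

-- exiting the loop means no adjacent equal pair is left
theorem passOnce_fix (xs : List Char) (h : (passOnce xs).length = xs.length) :
    List.IsChain (· ≠ ·) xs := by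
  fun_induction passOnce xs with
  | case1 b rest ih =>
    exfalso
    have hle := passOnce_length_le rest
    simp only [List.length_cons] at h
    omega
  | case2 a b rest hab ih =>
    simp only [List.length_cons, Nat.add_right_cancel_iff] at h
    exact List.isChain_cons_cons.mpr ⟨hab, ih h⟩
  | case3 xs hx =>
    cases xs with
    | nil => simp
    | cons a t =>
      cases t with
      | nil => simp
      | cons b r => exact absurd rfl (by intro he; exact hx a b r he)

-- an irreducible list just gets pushed: the fold is its reverse
theorem foldl_irred (l : List Char) :
    ∀ st : List Char, List.IsChain (· ≠ ·) l →
      (∀ a b, l.head? = some a → st.head? = some b → a ≠ b) →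
      l.foldl pstep st = l.reverse ++ st := by
  induction l with
  | nil => intro st _ _; simp
  | cons a l ih =>
    intro st hch hhd
    have hstep : pstep st a = a :: st := by
      cases st with
      | nil => simp [pstep]
      | cons b rest =>
        have : a ≠ b := hhd a b rfl rfl
        simp [pstep, Ne.symm this]
    simp only [List.foldl_cons, hstep]
    rw [ih (a :: st) (List.isChain_cons.mp hch).2]
    · simp
    · intro x y hx hy
      cases l with
      | nil => simp at hx
      | cons c l' =>
        simp at hx hy
        subst hx; subst hy
        exact Ne.symm ((List.isChain_cons_cons.mp hch).1)

-- across the whole loop the fold result is unchanged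
theorem foldl_reduceLoop (cur : List Char) :
    (reduceLoop cur).foldl pstep [] = cur.foldl pstep [] := by
  fun_induction reduceLoop cur with
  | case1 cur nxt heq => rfl
  | case2 cur nxt heq ih =>
    rw [ih]
    exact (foldl_passOnce cur [] (by simp [StkInv])).symm

theorem reduceLoop_irred (cur : List Char) :
    List.IsChain (· ≠ ·) (reduceLoop cur) := by
  fun_induction reduceLoop cur with
  | case1 cur nxt heq => exact passOnce_fix cur heq
  | case2 cur nxt heq ih => exact ih

-- ===== VERDICT (by name: the statement is the Claim_ definition above) =====
theorem solution_spec : Claim_equal_solution := by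
  intro s _
  unfold Spec_solution solution solution_alt
  have hA : s.toList.foldl solA_step [] = (s.toList.foldl pstep []).reverse := by
    simpa using foldA_eq s.toList []
  have hB : (reduceLoop s.toList).reverse = s.toList.foldl pstep [] := by
    have h1 := foldl_reduceLoop s.toList
    have h2 := foldl_irred (reduceLoop s.toList) [] (reduceLoop_irred s.toList)
      (by intro a b _ hb; simp at hb)
    rw [h2] at h1; simpa using h1
  rw [hA, ← hB]
  simp
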